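-- pv_equiv track=rewrite | github.com/batrachianai/toad | benchmark_parallel.py | generate_paths
-- ===== SOURCE A (Python) =====
-- def generate_paths(count: int) -> list[str]:
--     """Generate a realistic list of file paths."""
--     paths = []
--     for i in range(count):
--         if i % 10 == 0:
--             paths.append(f"src/components/Button{i}.tsx")
--         elif i % 10 == 1:
--             paths.append(f"src/utils/helper{i}.ts")
--         elif i % 10 == 2:
--             paths.append(f"tests/unit/test_{i}.py")
--         elif i % 10 == 3:
--             paths.append(f"docs/api/reference{i}.md")
--         elif i % 10 == 4:
--             paths.append(f"config/settings_{i}.json")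
--         elif i % 10 == 5:
--             paths.append(f"lib/vendor/module{i}.js")
--         elif i % 10 == 6:
--             paths.append(f"build/output/artifact{i}.o")
--         elif i % 10 == 7:
--             paths.append(f"assets/images/icon{i}.png")
--         elif i % 10 == 8:
--             paths.append(f"scripts/deploy/task{i}.sh")
--         else:
--             paths.append(f"data/cache/file{i}.dat")
--     return paths
-- ===== SOURCE B (Python) =====
-- # Decade-block rewrite: emit one whole block of ten literal paths per iteration
-- # (the i%10 dispatch disappears entirely because each block starts at a multiple
-- # of 10, so every position within the block is known), then truncate the last
-- # block by slicing.
-- def generate_paths(count: int) -> list[str]: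
--     """Generate a realistic list of file paths."""
--     out = []
--     base = 0
--     while base < count:
--         decade = [
--             f"src/components/Button{base}.tsx",
--             f"src/utils/helper{base + 1}.ts",
--             f"tests/unit/test_{base + 2}.py",
--             f"docs/api/reference{base + 3}.md",
--             f"config/settings_{base + 4}.json",
--             f"lib/vendor/module{base + 5}.js",
--             f"build/output/artifact{base + 6}.o",
--             f"assets/images/icon{base + 7}.png",
--             f"scripts/deploy/task{base + 8}.sh",
--             f"data/cache/file{base + 9}.dat",
--         ]
--         out.extend(decade[:count - base])
--         base += 10
--     return out
-- ===== Notes on version B (the rewrite author's own statement) =====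
-- stated objective: alternative
-- what changed: B builds the output a whole decade-block of ten literal paths at a time (each block starts at a multiple of 10, so the i%10 dispatch disappears entirely) and truncates the final block by slicing, instead of A's per-element 10-way if/elif inside a single append loop.
import Mathlib
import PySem

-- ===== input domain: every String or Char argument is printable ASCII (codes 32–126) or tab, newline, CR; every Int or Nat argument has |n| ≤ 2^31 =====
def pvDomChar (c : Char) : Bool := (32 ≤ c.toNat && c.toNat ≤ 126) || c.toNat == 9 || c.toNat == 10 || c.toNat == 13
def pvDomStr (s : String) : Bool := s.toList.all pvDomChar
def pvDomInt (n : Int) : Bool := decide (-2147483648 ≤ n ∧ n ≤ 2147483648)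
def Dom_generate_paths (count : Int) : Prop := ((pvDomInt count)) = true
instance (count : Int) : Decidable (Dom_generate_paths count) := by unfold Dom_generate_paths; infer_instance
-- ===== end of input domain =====

-- B builds the output one decade-block of ten literal paths at a time (so the i%10
-- dispatch disappears) and truncates the last block by slicing (objective: alternative).


-- ===== PORT A =====
def generate_paths (count : Int) : List String :=
  (PySem.List.pyRange 0 count 1).foldl (fun paths i =>
    if PySem.Int.mod i 10 = 0 then paths ++ ["src/components/Button" ++ PySem.Int.toStr i ++ ".tsx"]
    else if PySem.Int.mod i 10 = 1 then paths ++ ["src/utils/helper" ++ PySem.Int.toStr i ++ ".ts"]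
    else if PySem.Int.mod i 10 = 2 then paths ++ ["tests/unit/test_" ++ PySem.Int.toStr i ++ ".py"]
    else if PySem.Int.mod i 10 = 3 then paths ++ ["docs/api/reference" ++ PySem.Int.toStr i ++ ".md"]
    else if PySem.Int.mod i 10 = 4 then paths ++ ["config/settings_" ++ PySem.Int.toStr i ++ ".json"]
    else if PySem.Int.mod i 10 = 5 then paths ++ ["lib/vendor/module" ++ PySem.Int.toStr i ++ ".js"]
    else if PySem.Int.mod i 10 = 6 then paths ++ ["build/output/artifact" ++ PySem.Int.toStr i ++ ".o"]
    else if PySem.Int.mod i 10 = 7 then paths ++ ["assets/images/icon" ++ PySem.Int.toStr i ++ ".png"]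
    else if PySem.Int.mod i 10 = 8 then paths ++ ["scripts/deploy/task" ++ PySem.Int.toStr i ++ ".sh"]
    else paths ++ ["data/cache/file" ++ PySem.Int.toStr i ++ ".dat"]) []

-- ===== PORT B =====
-- one decade block starting at `base` (the ten positions are fixed, no modulo)
def pvDecade (base : Int) : List String :=
  ["src/components/Button" ++ PySem.Int.toStr base ++ ".tsx",
   "src/utils/helper" ++ PySem.Int.toStr (base + 1) ++ ".ts",
   "tests/unit/test_" ++ PySem.Int.toStr (base + 2) ++ ".py",
   "docs/api/reference" ++ PySem.Int.toStr (base + 3) ++ ".md",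
   "config/settings_" ++ PySem.Int.toStr (base + 4) ++ ".json",
   "lib/vendor/module" ++ PySem.Int.toStr (base + 5) ++ ".js",
   "build/output/artifact" ++ PySem.Int.toStr (base + 6) ++ ".o",
   "assets/images/icon" ++ PySem.Int.toStr (base + 7) ++ ".png",
   "scripts/deploy/task" ++ PySem.Int.toStr (base + 8) ++ ".sh",
   "data/cache/file" ++ PySem.Int.toStr (base + 9) ++ ".dat"]

-- Source B's while loop; `decade[:count - base]` with count - base ≥ 1 (guaranteed by the
-- loop guard) is exactly `take (count - base).toNat`.
-- structural fuel recursion (fuel = count.toNat bounds the number of loop iterations)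
def pvAltGo (count : Int) : Nat → Int → List String
  | 0, _ => []
  | fuel + 1, base =>
    if base < count then
      (pvDecade base).take (count - base).toNat ++ pvAltGo count fuel (base + 10)
    else []

def generate_paths_alt (count : Int) : List String := pvAltGo count count.toNat 0

-- ===== PRECONDITION & SPEC =====
def Spec_generate_paths (count : Int) (out : List String) : Prop := out = generate_paths_alt count
instance (count : Int) (out : List String) : Decidable (Spec_generate_paths count out) := by unfold Spec_generate_paths; infer_instance

-- ===== CLAIM (what is proved, stated in full; the proofs are below) =====
def Claim_equal_generate_paths : Prop := ∀ (count : Int), Dom_generate_paths count → Spec_generate_paths count (generate_paths count)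

-- ===== LEMMAS AND PROOFS =====

-- A's per-element path as a single-string function of i
def pvPathOf (i : Int) : String :=
  if PySem.Int.mod i 10 = 0 then "src/components/Button" ++ PySem.Int.toStr i ++ ".tsx"
  else if PySem.Int.mod i 10 = 1 then "src/utils/helper" ++ PySem.Int.toStr i ++ ".ts"
  else if PySem.Int.mod i 10 = 2 then "tests/unit/test_" ++ PySem.Int.toStr i ++ ".py"
  else if PySem.Int.mod i 10 = 3 then "docs/api/reference" ++ PySem.Int.toStr i ++ ".md"
  else if PySem.Int.mod i 10 = 4 then "config/settings_" ++ PySem.Int.toStr i ++ ".json"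
  else if PySem.Int.mod i 10 = 5 then "lib/vendor/module" ++ PySem.Int.toStr i ++ ".js"
  else if PySem.Int.mod i 10 = 6 then "build/output/artifact" ++ PySem.Int.toStr i ++ ".o"
  else if PySem.Int.mod i 10 = 7 then "assets/images/icon" ++ PySem.Int.toStr i ++ ".png"
  else if PySem.Int.mod i 10 = 8 then "scripts/deploy/task" ++ PySem.Int.toStr i ++ ".sh"
  else "data/cache/file" ++ PySem.Int.toStr i ++ ".dat"

theorem pv_foldl_append_map {α β : Type} (g : α → β) :
    ∀ (l : List α) (acc : List β),
      l.foldl (fun a x => a ++ [g x]) acc = acc ++ l.map g := by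
  intro l
  induction l with
  | nil => intro acc; simp
  | cons x xs ih => intro acc; simp [List.foldl, ih]

theorem pv_A_eq_map (count : Int) :
    generate_paths count = (PySem.List.pyRange 0 count 1).map pvPathOf := by
  unfold generate_paths
  have h : ∀ (paths : List String) (i : Int),
      (if PySem.Int.mod i 10 = 0 then paths ++ ["src/components/Button" ++ PySem.Int.toStr i ++ ".tsx"]
       else if PySem.Int.mod i 10 = 1 then paths ++ ["src/utils/helper" ++ PySem.Int.toStr i ++ ".ts"]
       else if PySem.Int.mod i 10 = 2 then paths ++ ["tests/unit/test_" ++ PySem.Int.toStr i ++ ".py"]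
       else if PySem.Int.mod i 10 = 3 then paths ++ ["docs/api/reference" ++ PySem.Int.toStr i ++ ".md"]
       else if PySem.Int.mod i 10 = 4 then paths ++ ["config/settings_" ++ PySem.Int.toStr i ++ ".json"]
       else if PySem.Int.mod i 10 = 5 then paths ++ ["lib/vendor/module" ++ PySem.Int.toStr i ++ ".js"]
       else if PySem.Int.mod i 10 = 6 then paths ++ ["build/output/artifact" ++ PySem.Int.toStr i ++ ".o"]
       else if PySem.Int.mod i 10 = 7 then paths ++ ["assets/images/icon" ++ PySem.Int.toStr i ++ ".png"]
       else if PySem.Int.mod i 10 = 8 then paths ++ ["scripts/deploy/task" ++ PySem.Int.toStr i ++ ".sh"]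
       else paths ++ ["data/cache/file" ++ PySem.Int.toStr i ++ ".dat"]) =
      paths ++ [pvPathOf i] := by
    intro paths i
    unfold pvPathOf
    split_ifs <;> rfl
  calc (PySem.List.pyRange 0 count 1).foldl _ []
      = (PySem.List.pyRange 0 count 1).foldl (fun paths i => paths ++ [pvPathOf i]) [] := by
        congr 1; funext paths i; exact h paths i
    _ = _ := by rw [pv_foldl_append_map]; simp

-- one full decade equals A's paths for the ten indices base..base+9, when 10 ∣ base
theorem pv_decade_eq (base : Int) (hb : base % 10 = 0) :
    pvDecade base = (PySem.List.pyRange base (base + 10) 1).map pvPathOf := by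
  have hk : ∀ j : Int, PySem.Int.mod j 10 = j % 10 :=
    fun j => PySem.Int.mod_eq_emod_of_pos (by norm_num)
  have hr : PySem.List.pyRange base (base + 10) 1 =
      [base, base + 1, base + 2, base + 3, base + 4,
       base + 5, base + 6, base + 7, base + 8, base + 9] := by
    rw [PySem.List.pyRange_one]
    have h10 : (base + 10 - base).toNat = 10 := by omega
    rw [h10]
    norm_num [List.range_succ]
  rw [hr]
  simp only [List.map]
  unfold pvDecade pvPathOf
  rw [show PySem.Int.mod base 10 = 0 from by rw [hk]; omega,
      show PySem.Int.mod (base + 1) 10 = 1 from by rw [hk]; omega,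
      show PySem.Int.mod (base + 2) 10 = 2 from by rw [hk]; omega,
      show PySem.Int.mod (base + 3) 10 = 3 from by rw [hk]; omega,
      show PySem.Int.mod (base + 4) 10 = 4 from by rw [hk]; omega,
      show PySem.Int.mod (base + 5) 10 = 5 from by rw [hk]; omega,
      show PySem.Int.mod (base + 6) 10 = 6 from by rw [hk]; omega,
      show PySem.Int.mod (base + 7) 10 = 7 from by rw [hk]; omega,
      show PySem.Int.mod (base + 8) 10 = 8 from by rw [hk]; omega,
      show PySem.Int.mod (base + 9) 10 = 9 from by rw [hk]; omega]
  norm_num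

theorem pv_altGo_eq (count : Int) : ∀ (fuel : Nat) (base : Int),
    base % 10 = 0 → count - base ≤ 10 * fuel →
    pvAltGo count fuel base = (PySem.List.pyRange base count 1).map pvPathOf := by
  intro fuel
  induction fuel with
  | zero =>
    intro base _ hf
    rw [pvAltGo, PySem.List.pyRange_one_eq_nil (by omega)]
    simp
  | succ fuel ih =>
  intro base hb hf
  rw [pvAltGo]
  by_cases h : base < count
  · simp only [h, if_pos]
    rw [ih (base + 10) (by omega) (by omega)]
    by_cases h10 : base + 10 ≤ count
    · -- full decade
      rw [List.take_of_length_le (by unfold pvDecade; simp; omega)]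
      rw [pv_decade_eq base hb,
          PySem.List.pyRange_one_append base (base + 10) count (by omega) h10,
          List.map_append]
    · -- partial last decade: the tail range is empty, truncate the decade
      rw [PySem.List.pyRange_one_eq_nil (a := base + 10) (b := count) (by omega)]
      simp only [List.map_nil, List.append_nil]
      rw [pv_decade_eq base hb]
      rw [PySem.List.pyRange_one (a := base) (b := base + 10)]
      rw [PySem.List.pyRange_one (a := base) (b := count)]
      rw [← List.map_take, ← List.map_take, List.take_range]
      have hmin : min (count - base).toNat (base + 10 - base).toNat = (count - base).toNat := by
        omega
      simp only [hmin]
  · simp only [h, if_neg, not_false_iff]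
    rw [PySem.List.pyRange_one_eq_nil (by omega)]
    simp

-- ===== VERDICT (by name: the statement is the Claim_ definition above) =====
theorem generate_paths_spec : Claim_equal_generate_paths := by
  intro count _
  unfold Spec_generate_paths generate_paths_alt
  rw [pv_A_eq_map, pv_altGo_eq count count.toNat 0 (by norm_num) (by omega)]
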